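-- pv_equiv track=rewrite | github.com/crowdgames/mdp-level-assembly | SummervilleAgent.py | levelTile
-- ===== SOURCE A (Python) =====
-- def levelTile(levelStr, wrapx, x, y):
--     maxX = len(levelStr[0])-1
--     maxY = len(levelStr)-1
--
--     if y < 0:
--         y = 0
--
--     if y > maxY:
--         return None, None
--
--     if wrapx:
--         while x < 0:
--             x += (maxX + 1)
--
--         while x > maxX:
--             x -= (maxX + 1)
--
--     else:
--         if x < 0 or x > maxX:
--             return None, None
--
--     return levelStr[y][x], (x, y)
-- ===== SOURCE B (Python) =====
-- def levelTile(levelStr, wrapx, x, y):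
--     height = len(levelStr)
--     width = len(levelStr[0])
--     y = max(y, 0)
--     if y >= height:
--         return None, None
--     if wrapx:
--         x %= width
--     elif not (0 <= x < width):
--         return None, None
--     return levelStr[y][x], (x, y)
-- ===== Notes on version B (the rewrite author's own statement) =====
-- stated objective: simpler
-- what changed: The two x-normalization while loops of the wrapx branch are replaced by a single closed-form modulo (x %= width), and the y clamp/guards are expressed directly via max and range comparisons.
-- outside the precondition, e.g. on levelTile([], False, 0, 0): A raises IndexError, B raises IndexError; on levelTile(['ab', 'a'], True, 1, 1): A raises IndexError, B raises IndexError
import Mathlib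
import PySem

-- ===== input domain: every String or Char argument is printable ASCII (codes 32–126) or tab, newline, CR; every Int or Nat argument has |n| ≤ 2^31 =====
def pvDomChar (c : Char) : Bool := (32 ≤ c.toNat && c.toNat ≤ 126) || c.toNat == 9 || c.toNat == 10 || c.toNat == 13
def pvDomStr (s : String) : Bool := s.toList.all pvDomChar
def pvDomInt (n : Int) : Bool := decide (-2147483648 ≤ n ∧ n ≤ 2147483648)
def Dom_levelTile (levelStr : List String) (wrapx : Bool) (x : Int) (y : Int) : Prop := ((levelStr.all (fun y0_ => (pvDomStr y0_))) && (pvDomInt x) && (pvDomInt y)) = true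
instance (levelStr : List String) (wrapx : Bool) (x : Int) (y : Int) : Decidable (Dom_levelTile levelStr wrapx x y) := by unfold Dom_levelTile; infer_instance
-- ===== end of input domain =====

-- ===== PORT A =====
-- B replaces A's two x-normalization while loops by one closed-form modulo; simpler, same values on Pre_.
-- while x < 0: x += W   (the '0 < W' guard only makes the recursion total; Python diverges there, excluded by Pre_)
def pvWhileAdd (x W : Int) : Int :=
  if x < 0 then (if 0 < W then pvWhileAdd (x + W) W else x) else x
termination_by (-x).toNat
decreasing_by omega

-- while x > maxX: x -= W   (same totality guard)
def pvWhileSub (x maxX W : Int) : Int :=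
  if x > maxX then (if 0 < W then pvWhileSub (x - W) maxX W else x) else x
termination_by (x - maxX).toNat
decreasing_by omega

def levelTile (levelStr : List String) (wrapx : Bool) (x : Int) (y : Int) : Option String × (Option (Int × Int)) :=
  match PySem.List.pyGet? levelStr 0 with
  | none => (none, none)  -- Python raises IndexError on levelStr[0]; excluded by Pre_
  | some row0 =>
    let maxX : Int := PySem.Str.len row0 - 1
    let maxY : Int := (levelStr.length : Int) - 1
    let y := if y < 0 then 0 else y
    if y > maxY then (none, none)
    else if wrapx then
      let x := pvWhileSub (pvWhileAdd x (maxX + 1)) maxX (maxX + 1)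
      (((PySem.Str.pyGet? ((PySem.List.pyGet? levelStr y).getD "") x).map (fun c => String.ofList [c])), some (x, y))
    else if x < 0 ∨ x > maxX then (none, none)
    else (((PySem.Str.pyGet? ((PySem.List.pyGet? levelStr y).getD "") x).map (fun c => String.ofList [c])), some (x, y))

-- ===== PORT B =====
def levelTile_alt (levelStr : List String) (wrapx : Bool) (x : Int) (y : Int) : Option String × (Option (Int × Int)) :=
  let height : Int := (levelStr.length : Int)
  let width : Int := PySem.Str.len ((PySem.List.pyGet? levelStr 0).getD "")  -- len(levelStr[0]) raises on []; excluded by Pre_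
  let y := max y 0
  if height ≤ y then (none, none)
  else if wrapx then
    let x := PySem.Int.mod x width
    (((PySem.Str.pyGet? ((PySem.List.pyGet? levelStr y).getD "") x).map (fun c => String.ofList [c])), some (x, y))
  else if ¬ (0 ≤ x ∧ x < width) then (none, none)
  else (((PySem.Str.pyGet? ((PySem.List.pyGet? levelStr y).getD "") x).map (fun c => String.ofList [c])), some (x, y))

-- ===== PRECONDITION & SPEC =====
-- Pre_ excludes exactly the inputs where A does not return a value: the empty level list (IndexError),
-- wrapx with an empty first row and in-range y (A loops forever), and a tile access past the end of a
-- short (ragged) row (IndexError).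
def Pre_levelTile (levelStr : List String) (wrapx : Bool) (x : Int) (y : Int) : Prop :=
  levelStr ≠ [] ∧
  (max y 0 < (levelStr.length : Int) →
    let width := PySem.Str.len (levelStr.headD "")
    let rowLen := PySem.Str.len ((PySem.List.pyGet? levelStr (max y 0)).getD "")
    if wrapx then 0 < width ∧ PySem.Int.mod x width < rowLen
    else (0 ≤ x ∧ x < width → x < rowLen))
instance (levelStr : List String) (wrapx : Bool) (x : Int) (y : Int) : Decidable (Pre_levelTile levelStr wrapx x y) := by unfold Pre_levelTile; infer_instance

def pvWitness_levelTile : List String × Bool × Int × Int := (["ab.", "cd."], true, -4, 1)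

def Spec_levelTile (levelStr : List String) (wrapx : Bool) (x : Int) (y : Int) (out : Option String × (Option (Int × Int))) : Prop := out = levelTile_alt levelStr wrapx x y
instance (levelStr : List String) (wrapx : Bool) (x : Int) (y : Int) (out : Option String × (Option (Int × Int))) : Decidable (Spec_levelTile levelStr wrapx x y out) := by unfold Spec_levelTile; infer_instance

-- ===== CLAIM (what is proved, stated in full; the proofs are below) =====
def Claim_equal_levelTile : Prop := ∀ (levelStr : List String) (wrapx : Bool) (x : Int) (y : Int), Dom_levelTile levelStr wrapx x y → Pre_levelTile levelStr wrapx x y → Spec_levelTile levelStr wrapx x y (levelTile levelStr wrapx x y)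

-- ===== LEMMAS AND PROOFS =====
theorem pvWhileAdd_nonneg (x W : Int) (hW : 0 < W) : 0 ≤ pvWhileAdd x W := by
  fun_induction pvWhileAdd x W with
  | case1 x h1 h2 ih => exact ih
  | case2 x h1 h2 => omega
  | case3 x h => omega

theorem pvWhileAdd_emod (x W : Int) : pvWhileAdd x W % W = x % W := by
  fun_induction pvWhileAdd x W with
  | case1 x h1 h2 ih => rw [ih]; simp [Int.add_emod_right]
  | case2 x h1 h2 => rfl
  | case3 x h => rfl

theorem pvWhileSub_eq_emod (z W : Int) (hW : 0 < W) (hz : 0 ≤ z) : pvWhileSub z (W - 1) W = z % W := by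
  fun_induction pvWhileSub z (W-1) W with
  | case1 z h1 h2 ih => rw [ih (by omega), Int.sub_emod_right]
  | case2 z h1 h2 => omega
  | case3 z h => rw [Int.emod_eq_of_lt hz (by omega)]

theorem pvWrap_eq_emod (x W : Int) (hW : 0 < W) :
    pvWhileSub (pvWhileAdd x W) (W - 1) W = x % W := by
  rw [pvWhileSub_eq_emod _ _ hW (pvWhileAdd_nonneg x W hW), pvWhileAdd_emod]

-- ===== VERDICT (by name: the statement is the Claim_ definition above) =====
theorem levelTile_spec : Claim_equal_levelTile := by
  intro l wrapx x y _ hpre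
  obtain ⟨hne, hrest⟩ := hpre
  unfold Spec_levelTile levelTile levelTile_alt
  cases l with
  | nil => exact absurd rfl hne
  | cons r0 rs =>
    have hget0 : PySem.List.pyGet? (r0 :: rs) (0 : Int) = some r0 := by
      simp [PySem.List.pyGet?, PySem.List.pyIdx?]
    rw [hget0]
    simp only [Option.getD_some, List.headD_cons] at *
    have hy : (if y < 0 then (0 : Int) else y) = max y 0 := by split <;> omega
    rw [hy]
    by_cases hY : (((r0 :: rs).length : Int)) ≤ max y 0
    · rw [if_pos (by omega), if_pos hY]
    · rw [if_neg (by omega), if_neg hY]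
      have hin := hrest (by omega)
      cases wrapx with
      | false =>
        simp only [if_false, Bool.false_eq_true] at *
        by_cases hx : 0 ≤ x ∧ x < PySem.Str.len r0
        · rw [if_neg (by omega), if_neg (by simpa using hx)]
        · rw [if_pos (by omega), if_pos (by simpa using hx)]
      | true =>
        simp only [if_true] at *
        obtain ⟨hW, _⟩ := hin
        have e1 : PySem.Str.len r0 - 1 + 1 = PySem.Str.len r0 := by ring
        rw [e1, pvWrap_eq_emod x _ hW, PySem.Int.mod_eq_emod_of_pos hW]
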